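-- pv_equiv track=rewrite | github.com/eliottcassidy2000/math | 04-computation/eigenvalue_one_analysis.py | compute_M_offdiag
-- ===== SOURCE A (Python) =====
-- from itertools import permutations
--
-- def compute_M_offdiag(T, n, a, b):
--     U = [v for v in range(n) if v != a and v != b]
--     val = 0
--     for mask in range(1 << len(U)):
--         S_list = [U[k] for k in range(len(U)) if mask & (1 << k)]
--         R = [U[k] for k in range(len(U)) if not (mask & (1 << k))]
--         sign = (-1)**len(S_list)
--         S_set = sorted(set(S_list) | {a})
--         R_set = sorted(set(R) | {b})
--         ea = 0
--         if len(S_set) == 1: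
--             ea = 1
--         else:
--             for p in permutations(S_set):
--                 if p[-1] != a: continue
--                 prod = 1
--                 for k in range(len(p)-1):
--                     prod *= T.get((p[k], p[k+1]), 0)
--                 ea += prod
--         bb2 = 0
--         if len(R_set) == 1:
--             bb2 = 1
--         else:
--             for p in permutations(R_set):
--                 if p[0] != b: continue
--                 prod = 1
--                 for k in range(len(p)-1):
--                     prod *= T.get((p[k], p[k+1]), 0)
--                 bb2 += prod
--         val += sign * ea * bb2
--     return val
-- ===== SOURCE B (Python) =====
-- def compute_M_offdiag(T, n, a, b):
--     # Same value as the permutation-enumeration version, computed by recursive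
--     # decomposition of Hamiltonian-path sums instead of iterating permutations.
--     U = [v for v in range(n) if v != a and v != b]
--
--     def path_end(S, t):
--         # sum over all orderings q of S of the product of T-weights along q followed by t
--         if not S:
--             return 1
--         total = 0
--         for i in range(len(S)):
--             total += path_end(S[:i] + S[i+1:], S[i]) * T.get((S[i], t), 0)
--         return total
--
--     def path_start(t, S):
--         # sum over all orderings q of S of the product of T-weights along t followed by q
--         if not S:
--             return 1
--         total = 0
--         for i in range(len(S)):
--             total += T.get((t, S[i]), 0) * path_start(S[i], S[:i] + S[i+1:])
--         return total
--
--     val = 0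
--     for mask in range(1 << len(U)):
--         S = [U[k] for k in range(len(U)) if mask & (1 << k)]
--         R = [U[k] for k in range(len(U)) if not (mask & (1 << k))]
--         val += (-1) ** len(S) * path_end(S, a) * path_start(b, R)
--     return val
-- ===== Notes on version B (the rewrite author's own statement) =====
-- stated objective: alternative
-- what changed: B replaces A's inner filtered enumeration of all permutations of each subset (with per-permutation product loops) by two recursive decompositions of the Hamiltonian-path sums (path_end/path_start) that extend a path one vertex at a time, so no permutation list is ever materialised or filtered.
import Mathlib
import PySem

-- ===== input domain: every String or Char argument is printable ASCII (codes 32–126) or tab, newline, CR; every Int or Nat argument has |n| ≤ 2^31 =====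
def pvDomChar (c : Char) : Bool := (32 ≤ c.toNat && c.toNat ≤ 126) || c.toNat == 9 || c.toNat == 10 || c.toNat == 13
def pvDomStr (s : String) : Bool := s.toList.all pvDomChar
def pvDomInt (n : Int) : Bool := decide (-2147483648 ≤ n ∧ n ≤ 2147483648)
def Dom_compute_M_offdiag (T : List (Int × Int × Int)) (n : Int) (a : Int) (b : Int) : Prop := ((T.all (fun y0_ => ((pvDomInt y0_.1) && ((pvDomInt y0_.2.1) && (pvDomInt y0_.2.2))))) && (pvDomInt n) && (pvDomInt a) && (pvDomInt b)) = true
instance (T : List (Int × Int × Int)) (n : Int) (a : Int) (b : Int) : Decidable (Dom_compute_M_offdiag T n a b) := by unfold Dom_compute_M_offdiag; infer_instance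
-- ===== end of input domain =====

-- B replaces A's filtered enumeration of all permutations of each subset by a recursive
-- decomposition of the Hamiltonian-path sums (objective: alternative algorithm, same cost class).

-- ===== PORT A =====
-- `T.get((x, y), 0)`: first-match lookup in the association list of (x, y, v) triples.
def tget (T : List (Int × Int × Int)) (x y : Int) : Int :=
  match T with
  | [] => 0
  | (p, q, v) :: rest => if p = x ∧ q = y then v else tget rest x y

-- A's inner loop `prod = 1; for k in range(len(p)-1): prod *= T.get((p[k], p[k+1]), 0)`,
-- ported as the structural recursion over the consecutive pairs of p (exact for every p).
def prodChain (T : List (Int × Int × Int)) : List Int → Int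
  | x :: y :: r => tget T x y * prodChain T (y :: r)
  | _ => 1

def compute_M_offdiag (T : List (Int × Int × Int)) (n : Int) (a : Int) (b : Int) : Int :=
  let U := (PySem.List.pyRange 0 n 1).filter (fun v => v != a && v != b)
  (List.range (2 ^ U.length)).foldl (fun val mask =>
    let S_list := ((List.range U.length).filter (fun k => mask.testBit k)).map (fun k => U.getD k 0)
    let R := ((List.range U.length).filter (fun k => !mask.testBit k)).map (fun k => U.getD k 0)
    let sign : Int := (-1) ^ S_list.length
    let S_set := PySem.List.sorted (PySem.Set.union (PySem.Set.ofList S_list) [a]) (fun x => x)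
    let R_set := PySem.List.sorted (PySem.Set.union (PySem.Set.ofList R) [b]) (fun x => x)
    let ea : Int := if S_set.length = 1 then 1 else
      (PySem.List.permutations S_set S_set.length).foldl (fun acc p =>
        if PySem.List.pyGet? p (-1) == some a then acc + prodChain T p else acc) 0
    let bb2 : Int := if R_set.length = 1 then 1 else
      (PySem.List.permutations R_set R_set.length).foldl (fun acc p =>
        if PySem.List.pyGet? p 0 == some b then acc + prodChain T p else acc) 0
    val + sign * ea * bb2) 0

-- ===== PORT B =====
-- B's loop `for i in range(len(S)): ... S[:i] + S[i+1:], S[i] ...`, enumerated as the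
-- list of (S[i], S[:i] + S[i+1:]) pairs in order of i.
def removeEach : List Int → List (Int × List Int)
  | [] => []
  | x :: xs => (x, xs) :: (removeEach xs).map (fun p => (p.1, x :: p.2))

theorem removeEach_len : ∀ (S : List Int), ∀ p ∈ removeEach S, p.2.length + 1 = S.length := by
  intro S
  induction S with
  | nil => simp [removeEach]
  | cons x xs ih =>
    intro p hp
    simp only [removeEach, List.mem_cons, List.mem_map] at hp
    rcases hp with rfl | ⟨q, hq, rfl⟩
    · simp
    · have := ih q hq; simp at this ⊢; omega

def pathEnd (T : List (Int × Int × Int)) (S : List Int) (t : Int) : Int :=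
  if h : S = [] then 1
  else (removeEach S).attach.foldl
    (fun total x => total + pathEnd T x.1.2 x.1.1 * tget T x.1.1 t) 0
termination_by S.length
decreasing_by
  have := removeEach_len S _ x.2
  omega

def pathStart (T : List (Int × Int × Int)) (t : Int) (S : List Int) : Int :=
  if h : S = [] then 1
  else (removeEach S).attach.foldl
    (fun total x => total + tget T t x.1.1 * pathStart T x.1.1 x.1.2) 0
termination_by S.length
decreasing_by
  have := removeEach_len S _ x.2
  omega

def compute_M_offdiag_alt (T : List (Int × Int × Int)) (n : Int) (a : Int) (b : Int) : Int :=
  let U := (PySem.List.pyRange 0 n 1).filter (fun v => v != a && v != b)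
  (List.range (2 ^ U.length)).foldl (fun val mask =>
    let S_list := ((List.range U.length).filter (fun k => mask.testBit k)).map (fun k => U.getD k 0)
    let R := ((List.range U.length).filter (fun k => !mask.testBit k)).map (fun k => U.getD k 0)
    val + (-1) ^ S_list.length * pathEnd T S_list a * pathStart T b R) 0

-- ===== PRECONDITION & SPEC =====
def Spec_compute_M_offdiag (T : List (Int × Int × Int)) (n : Int) (a : Int) (b : Int) (out : Int) : Prop := out = compute_M_offdiag_alt T n a b
instance (T : List (Int × Int × Int)) (n : Int) (a : Int) (b : Int) (out : Int) : Decidable (Spec_compute_M_offdiag T n a b out) := by unfold Spec_compute_M_offdiag; infer_instance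

-- ===== CLAIM (what is proved, stated in full; the proofs are below) =====
def Claim_equal_compute_M_offdiag : Prop := ∀ (T : List (Int × Int × Int)) (n : Int) (a : Int) (b : Int), Dom_compute_M_offdiag T n a b → Spec_compute_M_offdiag T n a b (compute_M_offdiag T n a b)

-- ===== LEMMAS AND PROOFS =====

-- Abbreviation: the full-length permutation list of M (what `permutations(M)` iterates).
def PP (M : List Int) : List (List Int) := PySem.List.permutations M M.length

-- Spec sums the two programs are reduced to:
--   Dd T u M a = sum over orderings q of M of the chain product of u :: q ++ [a]
--   DS T u M   = sum over orderings q of M of the chain product of u :: q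
--   Hf T u M a = same as DS but only over orderings whose last element is a
def Dd (T : List (Int × Int × Int)) (u : Int) (M : List Int) (a : Int) : Int :=
  ((PP M).map (fun q => prodChain T (u :: (q ++ [a])))).sum
def DS (T : List (Int × Int × Int)) (u : Int) (M : List Int) : Int :=
  ((PP M).map (fun q => prodChain T (u :: q))).sum
def Hf (T : List (Int × Int × Int)) (u : Int) (M : List Int) (a : Int) : Int :=
  (((PP M).filter (fun q => q.getLast? == some a)).map (fun q => prodChain T (u :: q))).sum

theorem removeEach_eq_range : ∀ (S : List Int),
    removeEach S = (List.range S.length).map (fun i => (S.getD i 0, S.eraseIdx i)) := by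
  intro S
  induction S with
  | nil => simp [removeEach]
  | cons x xs ih =>
    simp only [removeEach, List.length_cons, List.range_succ_eq_map, List.map_cons, List.map_map, ih]
    simp

theorem removeEach_map_eq {β : Type} : ∀ (S : List Int) (F : Int → List Int → β), S.Nodup →
    (removeEach S).map (fun p => F p.1 p.2) = S.map (fun x => F x (S.erase x)) := by
  intro S
  induction S with
  | nil => simp [removeEach]
  | cons x xs ih =>
    intro F h
    have hx : x ∉ xs := (List.nodup_cons.mp h).1
    simp only [removeEach, List.map_cons, List.map_map]
    rw [List.erase_cons_head]
    congr 1
    have := ih (fun y r => F y (x :: r)) (List.nodup_cons.mp h).2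
    have h2 : List.map (fun y => F y (x :: xs.erase y)) xs = List.map (fun y => F y ((x :: xs).erase y)) xs := by
      apply List.map_congr_left
      intro y hy
      rw [List.erase_cons_tail]
      simp only [beq_iff_eq]
      rintro rfl; exact hx hy
    exact this.trans h2

theorem PP_unfold (M : List Int) (h : M ≠ []) :
    PP M = (removeEach M).flatMap
      (fun pr => (PySem.List.permutations pr.2 pr.2.length).map (pr.1 :: ·)) := by
  obtain ⟨m, hm⟩ : ∃ m, M.length = m + 1 := by
    cases M with
    | nil => exact absurd rfl h
    | cons x xs => exact ⟨xs.length, rfl⟩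
  unfold PP
  rw [hm, PySem.List.permutations, removeEach_eq_range, List.flatMap_def, List.flatMap_def,
      List.map_map]
  congr 1
  apply List.map_congr_left
  intro i hi
  have hlt : i < M.length := List.mem_range.mp hi
  have h1 : M[i]? = some M[i] := List.getElem?_eq_getElem hlt
  have h2 : M.getD i 0 = M[i] := List.getD_eq_getElem M 0 hlt
  have h3 : (M.eraseIdx i).length = m := by
    rw [List.length_eraseIdx_of_lt hlt]; omega
  simp only [Function.comp, h1, h2, h3]

theorem sum_flatMap_map {α β : Type} (l : List α) (f : α → List β) (g : β → Int) :
    ((l.flatMap f).map g).sum = (l.map (fun x => ((f x).map g).sum)).sum := by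
  rw [List.flatMap_def, List.map_flatten, List.sum_flatten, List.map_map, List.map_map]
  rfl

theorem PP_len {M q : List Int} (h : q ∈ PP M) : q.length = M.length :=
  PySem.List.length_of_mem_permutations h

theorem Dd_base (T : List (Int × Int × Int)) (u a : Int) : Dd T u [] a = tget T u a := by
  simp [Dd, PP, PySem.List.permutations_zero, prodChain]

theorem DS_base (T : List (Int × Int × Int)) (u : Int) : DS T u [] = 1 := by
  simp [DS, PP, PySem.List.permutations_zero, prodChain]

theorem Dd_erase (T : List (Int × Int × Int)) (u a : Int) (M : List Int)
    (h : M.Nodup) (hne : M ≠ []) :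
    Dd T u M a = (M.map (fun x => tget T u x * Dd T x (M.erase x) a)).sum := by
  have step : ∀ pr : Int × List Int,
      (((PySem.List.permutations pr.2 pr.2.length).map (pr.1 :: ·)).map
        (fun q => prodChain T (u :: (q ++ [a])))).sum = tget T u pr.1 * Dd T pr.1 pr.2 a := by
    intro pr
    rw [List.map_map]
    rw [show ((fun q => prodChain T (u :: (q ++ [a]))) ∘ (pr.1 :: ·))
        = fun q => tget T u pr.1 * prodChain T (pr.1 :: (q ++ [a])) from rfl]
    rw [List.sum_map_mul_left]
    rfl
  unfold Dd
  rw [PP_unfold M hne, sum_flatMap_map]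
  rw [List.map_congr_left (fun pr _ => step pr)]
  exact congrArg List.sum (removeEach_map_eq M (fun x r => tget T u x * Dd T x r a) h)

theorem sum_swap_erase : ∀ (M : List Int) (F : Int → Int → Int), M.Nodup →
    (M.map (fun y => ((M.erase y).map (fun x => F y x)).sum)).sum
      = (M.map (fun x => ((M.erase x).map (fun y => F y x)).sum)).sum := by
  intro M
  induction M with
  | nil => simp
  | cons z M' ih =>
    intro F h
    obtain ⟨hz, h'⟩ := List.nodup_cons.mp h
    have herase : ∀ y ∈ M', (z :: M').erase y = z :: M'.erase y := by
      intro y hy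
      rw [List.erase_cons_tail]
      simp only [beq_iff_eq]
      rintro rfl; exact hz hy
    simp only [List.map_cons, List.sum_cons, List.erase_cons_head]
    have hL : (M'.map (fun y => (((z :: M').erase y).map (fun x => F y x)).sum)).sum
        = (M'.map (fun y => F y z)).sum
          + (M'.map (fun y => ((M'.erase y).map (fun x => F y x)).sum)).sum := by
      rw [List.map_congr_left (l := M')
        (g := fun y => F y z + ((M'.erase y).map (fun x => F y x)).sum)
        (fun y hy => by rw [herase y hy]; simp)]
      exact PySem.List.sum_map_add_int M' _ _
    have hR : (M'.map (fun x => (((z :: M').erase x).map (fun y => F y x)).sum)).sum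
        = (M'.map (fun x => F z x)).sum
          + (M'.map (fun x => ((M'.erase x).map (fun y => F y x)).sum)).sum := by
      rw [List.map_congr_left (l := M')
        (g := fun x => F z x + ((M'.erase x).map (fun y => F y x)).sum)
        (fun x hx => by rw [herase x hx]; simp)]
      exact PySem.List.sum_map_add_int M' _ _
    rw [hL, hR, ih F h']
    ring


theorem sumc {α : Type} (l : List α) {f g : α → Int} (h : ∀ x ∈ l, f x = g x) :
    (l.map f).sum = (l.map g).sum := by rw [List.map_congr_left h]

theorem map_sum_erase (l : List Int) (f : Int → Int) (a : Int) (h : a ∈ l) :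
    (l.map f).sum = f a + ((l.erase a).map f).sum := by
  rw [((List.perm_cons_erase h).map f).sum_eq]; simp

theorem erase_ne_nil {M : List Int} {x : Int} (hx : x ∈ M) (hlen : 2 ≤ M.length) :
    M.erase x ≠ [] := by
  have := List.length_erase_of_mem hx
  intro hc
  rw [hc] at this
  simp at this
  omega

theorem mem_PP_ne_nil {M q : List Int} (hM : M ≠ []) (hq : q ∈ PP M) : q ≠ [] := by
  have h1 := PP_len hq
  intro hc
  cases M with
  | nil => exact hM rfl
  | cons x xs => rw [hc] at h1; simp at h1

theorem PP_single (x : Int) : PP [x] = [[x]] := by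
  rw [PP_unfold [x] (by simp)]
  simp [removeEach, PP, PySem.List.permutations_zero]

theorem block_last (T : List (Int × Int × Int)) (u a x : Int) (rest : List Int) (hrest : rest ≠ []) :
    ((((PySem.List.permutations rest rest.length).map (x :: ·)).filter
        (fun q => q.getLast? == some a)).map (fun q => prodChain T (u :: q))).sum
      = tget T u x * Hf T x rest a := by
  rw [List.filter_map]
  have hc : ∀ q ∈ PySem.List.permutations rest rest.length,
      ((fun q => q.getLast? == some a) ∘ (x :: ·)) q = (fun q => q.getLast? == some a) q := by
    intro q hq
    have hqne : q ≠ [] := mem_PP_ne_nil hrest hq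
    cases q with
    | nil => exact absurd rfl hqne
    | cons y q' => simp [List.getLast?_cons_cons]
  rw [List.filter_congr hc, List.map_map]
  rw [show ((fun q => prodChain T (u :: q)) ∘ (x :: ·))
      = fun q => tget T u x * prodChain T (x :: q) from rfl]
  rw [List.sum_map_mul_left]
  rfl

theorem Dd_back (T : List (Int × Int × Int)) : ∀ (N : Nat) (u t : Int) (M : List Int),
    M.length ≤ N → M.Nodup → M ≠ [] →
    Dd T u M t = (M.map (fun x => Dd T u (M.erase x) x * tget T x t)).sum := by
  intro N
  induction N with
  | zero =>
    intro u t M hlen _ hne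
    cases M with
    | nil => exact absurd rfl hne
    | cons y ys => simp at hlen
  | succ N ih =>
    intro u t M hlen h hne
    by_cases h1 : M.length = 1
    · obtain ⟨x, rfl⟩ := List.length_eq_one_iff.mp h1
      rw [Dd_erase T u t [x] (by simp) (by simp)]
      simp [Dd_base, List.erase_cons_head]
    · have h2 : 2 ≤ M.length := by
        have h0 : M.length ≠ 0 := fun hc => hne (List.eq_nil_of_length_eq_zero hc)
        omega
      have key := sum_swap_erase M
        (fun y x => tget T u y * (Dd T y ((M.erase y).erase x) x * tget T x t)) h
      calc Dd T u M t
          = (M.map (fun y => tget T u y * Dd T y (M.erase y) t)).sum := Dd_erase T u t M h hne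
        _ = (M.map (fun y => ((M.erase y).map
              (fun x => tget T u y * (Dd T y ((M.erase y).erase x) x * tget T x t))).sum)).sum := by
            apply sumc
            intro y hy
            rw [ih y t (M.erase y) (by have := List.length_erase_of_mem hy; omega)
                (h.erase y) (erase_ne_nil hy h2)]
            exact (List.sum_map_mul_left _ _ _).symm
        _ = (M.map (fun x => ((M.erase x).map
              (fun y => tget T u y * (Dd T y ((M.erase y).erase x) x * tget T x t))).sum)).sum := key
        _ = (M.map (fun x => Dd T u (M.erase x) x * tget T x t)).sum := by
            apply sumc
            intro x hx
            rw [Dd_erase T u x (M.erase x) (h.erase x) (erase_ne_nil hx h2),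
                ← List.sum_map_mul_right]
            apply sumc
            intro y hy
            rw [List.erase_comm y x]
            ring

theorem Hf_zero (T : List (Int × Int × Int)) (u a : Int) (M : List Int)
    (ha : a ∉ M) (hne : M ≠ []) : Hf T u M a = 0 := by
  unfold Hf
  have : (PP M).filter (fun q => q.getLast? == some a) = [] := by
    rw [List.filter_eq_nil_iff]
    intro q hq
    simp only [beq_iff_eq]
    intro hlast
    exact ha (PySem.List.mem_of_mem_of_mem_permutations hq (List.mem_of_getLast? hlast))
  rw [this]; rfl

theorem Hf_eq (T : List (Int × Int × Int)) (a : Int) : ∀ (N : Nat) (u : Int) (M : List Int),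
    M.length ≤ N → M.Nodup → a ∈ M → Hf T u M a = Dd T u (M.erase a) a := by
  intro N
  induction N with
  | zero =>
    intro u M hlen _ ha
    cases M with
    | nil => simp at ha
    | cons y ys => simp at hlen
  | succ N ih =>
    intro u M hlen h ha
    have hne : M ≠ [] := by rintro rfl; simp at ha
    by_cases h1 : M.length = 1
    · obtain ⟨x, rfl⟩ := List.length_eq_one_iff.mp h1
      have hxa : a = x := by simpa using ha
      subst hxa
      simp [Hf, PP_single, Dd_base, prodChain, List.erase_cons_head]
    · have h2 : 2 ≤ M.length := by
        have h0 : M.length ≠ 0 := fun hc => hne (List.eq_nil_of_length_eq_zero hc)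
        omega
      have hstep : Hf T u M a
          = (M.map (fun x => tget T u x * Hf T x (M.erase x) a)).sum := by
        unfold Hf
        rw [PP_unfold M hne, List.filter_flatMap, sum_flatMap_map]
        rw [List.map_congr_left (l := removeEach M)
          (g := fun pr => tget T u pr.1 * Hf T pr.1 pr.2 a)
          (fun pr hpr => block_last T u a pr.1 pr.2 (by
            have := removeEach_len M pr hpr
            intro hc; rw [hc] at this; simp at this; omega))]
        exact congrArg List.sum (removeEach_map_eq M (fun x r => tget T u x * Hf T x r a) h)
      rw [hstep, map_sum_erase M _ a ha]
      rw [Hf_zero T a a (M.erase a) (h.not_mem_erase) (erase_ne_nil ha h2), mul_zero, zero_add]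
      rw [Dd_erase T u a (M.erase a) (h.erase a) (erase_ne_nil ha h2)]
      apply sumc
      intro x hx
      have hxa : x ≠ a := ((h.mem_erase_iff).mp hx).1
      have hxM : x ∈ M := List.mem_of_mem_erase hx
      rw [ih x (M.erase x) (by have := List.length_erase_of_mem hxM; omega) (h.erase x)
          ((List.mem_erase_of_ne (Ne.symm hxa)).mpr ha)]
      rw [List.erase_comm x a]

theorem block_last' (T : List (Int × Int × Int)) (a x : Int) (rest : List Int) (hrest : rest ≠ []) :
    ((((PySem.List.permutations rest rest.length).map (x :: ·)).filter
        (fun q => q.getLast? == some a)).map (fun q => prodChain T q)).sum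
      = Hf T x rest a := by
  rw [List.filter_map]
  have hc : ∀ q ∈ PySem.List.permutations rest rest.length,
      ((fun q => q.getLast? == some a) ∘ (x :: ·)) q = (fun q => q.getLast? == some a) q := by
    intro q hq
    have hqne : q ≠ [] := mem_PP_ne_nil hrest hq
    cases q with
    | nil => exact absurd rfl hqne
    | cons y q' => simp [List.getLast?_cons_cons]
  rw [List.filter_congr hc, List.map_map]
  rfl

theorem ea_big (T : List (Int × Int × Int)) (a : Int) (M : List Int)
    (h : M.Nodup) (ha : a ∈ M) (hlen : 2 ≤ M.length) :
    (((PP M).filter (fun q => q.getLast? == some a)).map (fun q => prodChain T q)).sum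
      = ((M.erase a).map (fun x => Dd T x ((M.erase a).erase x) a)).sum := by
  have hne : M ≠ [] := by rintro rfl; simp at ha
  have hstep : (((PP M).filter (fun q => q.getLast? == some a)).map (fun q => prodChain T q)).sum
      = (M.map (fun x => Hf T x (M.erase x) a)).sum := by
    rw [PP_unfold M hne, List.filter_flatMap, sum_flatMap_map]
    rw [List.map_congr_left (l := removeEach M)
      (g := fun pr => Hf T pr.1 pr.2 a)
      (fun pr hpr => block_last' T a pr.1 pr.2 (by
        have := removeEach_len M pr hpr
        intro hc; rw [hc] at this; simp at this; omega))]
    exact congrArg List.sum (removeEach_map_eq M (fun x r => Hf T x r a) h)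
  rw [hstep, map_sum_erase M _ a ha]
  rw [Hf_zero T a a (M.erase a) (h.not_mem_erase) (erase_ne_nil ha hlen), zero_add]
  apply sumc
  intro x hx
  have hxa : x ≠ a := ((h.mem_erase_iff).mp hx).1
  have hxM : x ∈ M := List.mem_of_mem_erase hx
  rw [Hf_eq T a (M.erase x).length x (M.erase x) le_rfl (h.erase x)
      ((List.mem_erase_of_ne (Ne.symm hxa)).mpr ha)]
  rw [List.erase_comm x a]

theorem bb_big (T : List (Int × Int × Int)) (b : Int) (M : List Int)
    (h : M.Nodup) (hb : b ∈ M) :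
    (((PP M).filter (fun q => q[0]? == some b)).map (fun q => prodChain T q)).sum
      = DS T b (M.erase b) := by
  have hne : M ≠ [] := by rintro rfl; simp at hb
  have hblock : ∀ (x : Int) (rest : List Int),
      ((((PySem.List.permutations rest rest.length).map (x :: ·)).filter
          (fun q => q[0]? == some b)).map (fun q => prodChain T q)).sum
        = if x = b then DS T b rest else 0 := by
    intro x rest
    rw [List.filter_map]
    have hc : ∀ q ∈ PySem.List.permutations rest rest.length,
        ((fun q => q[0]? == some b) ∘ (x :: ·)) q = (fun _ => decide (x = b)) q := by
      intro q _
      by_cases hxb : x = b <;> simp [hxb]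
    rw [List.filter_congr hc]
    by_cases hxb : x = b
    · subst hxb
      simp only [decide_true]
      rw [List.filter_true, List.map_map]
      rfl
    · simp only [hxb, decide_false]
      rw [List.filter_false]
      simp
  have hstep : (((PP M).filter (fun q => q[0]? == some b)).map (fun q => prodChain T q)).sum
      = (M.map (fun x => if x = b then DS T b (M.erase x) else 0)).sum := by
    rw [PP_unfold M hne, List.filter_flatMap, sum_flatMap_map]
    rw [List.map_congr_left (l := removeEach M)
      (g := fun pr => if pr.1 = b then DS T b pr.2 else 0)
      (fun pr _ => hblock pr.1 pr.2)]
    exact congrArg List.sum (removeEach_map_eq M (fun x r => if x = b then DS T b r else 0) h)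
  rw [hstep, map_sum_erase M _ b hb, if_pos rfl]
  have : ((M.erase b).map (fun x => if x = b then DS T b (M.erase x) else 0)).sum = 0 := by
    apply List.sum_eq_zero
    intro y hy
    simp only [List.mem_map] at hy
    obtain ⟨x, hx, rfl⟩ := hy
    rw [if_neg ((h.mem_erase_iff).mp hx).1]
  rw [this, add_zero]

theorem pathEnd_unfold (T : List (Int × Int × Int)) (S : List Int) (t : Int) (h : S ≠ []) :
    pathEnd T S t = ((removeEach S).map (fun pr => pathEnd T pr.2 pr.1 * tget T pr.1 t)).sum := by
  rw [pathEnd, dif_neg h, PySem.List.foldl_add, zero_add,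
      List.attach_map_val (l := removeEach S) (f := fun pr => pathEnd T pr.2 pr.1 * tget T pr.1 t)]

theorem pathStart_unfold (T : List (Int × Int × Int)) (S : List Int) (t : Int) (h : S ≠ []) :
    pathStart T t S = ((removeEach S).map (fun pr => tget T t pr.1 * pathStart T pr.1 pr.2)).sum := by
  rw [pathStart, dif_neg h, PySem.List.foldl_add, zero_add,
      List.attach_map_val (l := removeEach S) (f := fun pr => tget T t pr.1 * pathStart T pr.1 pr.2)]

theorem pathEnd_eq (T : List (Int × Int × Int)) : ∀ (N : Nat) (t : Int) (S : List Int),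
    S.length ≤ N → S.Nodup →
    pathEnd T S t = if S = [] then 1 else (S.map (fun x => Dd T x (S.erase x) t)).sum := by
  intro N
  induction N with
  | zero =>
    intro t S hlen _
    cases S with
    | nil => simp [pathEnd]
    | cons y ys => simp at hlen
  | succ N ih =>
    intro t S hlen h
    by_cases hne : S = []
    · subst hne; simp [pathEnd]
    rw [if_neg hne, pathEnd_unfold T S t hne,
        congrArg List.sum (removeEach_map_eq S (fun x r => pathEnd T r x * tget T x t) h)]
    by_cases h1 : S.length = 1
    · obtain ⟨x, rfl⟩ := List.length_eq_one_iff.mp h1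
      have h0 : pathEnd T [] x = 1 := by simp [pathEnd]
      simp [removeEach, h0, Dd_base, List.erase_cons_head]
    · have h2 : 2 ≤ S.length := by
        have h0 : S.length ≠ 0 := fun hc => hne (List.eq_nil_of_length_eq_zero hc)
        omega
      have key := sum_swap_erase S
        (fun y x => Dd T y ((S.erase y).erase x) x * tget T x t) h
      calc (S.map (fun x => pathEnd T (S.erase x) x * tget T x t)).sum
          = (S.map (fun x => ((S.erase x).map
              (fun y => Dd T y ((S.erase y).erase x) x * tget T x t)).sum)).sum := by
            apply sumc
            intro x hx
            rw [ih x (S.erase x) (by have := List.length_erase_of_mem hx; omega) (h.erase x),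
                if_neg (erase_ne_nil hx h2), ← List.sum_map_mul_right]
            apply sumc
            intro y hy
            rw [List.erase_comm x y]
        _ = (S.map (fun y => ((S.erase y).map
              (fun x => Dd T y ((S.erase y).erase x) x * tget T x t)).sum)).sum := key.symm
        _ = (S.map (fun x => Dd T x (S.erase x) t)).sum := by
            apply sumc
            intro y hy
            exact (Dd_back T (S.erase y).length y t (S.erase y) le_rfl (h.erase y)
              (erase_ne_nil hy h2)).symm

theorem DS_erase (T : List (Int × Int × Int)) (t : Int) (S : List Int)
    (h : S.Nodup) (hne : S ≠ []) :
    DS T t S = (S.map (fun x => tget T t x * DS T x (S.erase x))).sum := by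
  have step : ∀ pr : Int × List Int,
      (((PySem.List.permutations pr.2 pr.2.length).map (pr.1 :: ·)).map
        (fun q => prodChain T (t :: q))).sum = tget T t pr.1 * DS T pr.1 pr.2 := by
    intro pr
    rw [List.map_map]
    rw [show ((fun q => prodChain T (t :: q)) ∘ (pr.1 :: ·))
        = fun q => tget T t pr.1 * prodChain T (pr.1 :: q) from rfl]
    rw [List.sum_map_mul_left]
    rfl
  unfold DS
  rw [PP_unfold S hne, sum_flatMap_map]
  rw [List.map_congr_left (fun pr _ => step pr)]
  exact congrArg List.sum (removeEach_map_eq S (fun x r => tget T t x * DS T x r) h)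

theorem pathStart_eq (T : List (Int × Int × Int)) : ∀ (N : Nat) (S : List Int) (t : Int),
    S.length ≤ N → S.Nodup → pathStart T t S = DS T t S := by
  intro N
  induction N with
  | zero =>
    intro S t hlen _
    cases S with
    | nil => simp [pathStart, DS_base]
    | cons y ys => simp at hlen
  | succ N ih =>
    intro S t hlen h
    by_cases hne : S = []
    · subst hne; simp [pathStart, DS_base]
    rw [pathStart_unfold T S t hne, DS_erase T t S h hne,
        congrArg List.sum (removeEach_map_eq S (fun x r => tget T t x * pathStart T x r) h)]
    apply sumc
    intro x hx
    show tget T t x * pathStart T x (S.erase x) = tget T t x * DS T x (S.erase x)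
    rw [ih (S.erase x) x (by have := List.length_erase_of_mem hx; omega) (h.erase x)]

theorem oi_erase (a : Int) : ∀ (l : List Int), a ∉ l →
    (List.orderedInsert (· ≤ ·) a l).erase a = l := by
  intro l
  induction l with
  | nil => simp [List.orderedInsert]
  | cons x xs ih =>
    intro h
    simp only [List.orderedInsert]
    split
    · rw [List.erase_cons_head]
    · rw [List.erase_cons_tail]
      · rw [ih (fun hm => h (List.mem_cons_of_mem _ hm))]
      · simp only [beq_iff_eq]
        rintro rfl; exact h (List.mem_cons_self)

theorem sortedset_eq (L : List Int) (a : Int) (h : L.Pairwise (· < ·)) (ha : a ∉ L) :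
    PySem.List.sorted (PySem.Set.union (PySem.Set.ofList L) [a]) (fun x => x)
      = List.orderedInsert (· ≤ ·) a L := by
  have hnd : L.Nodup := h.imp ne_of_lt
  apply PySem.List.sorted_eq_of_perm_of_pairwise_lt
  · have h1 : PySem.Set.ofList L = L := PySem.Set.ofList_eq_self_of_nodup L hnd
    have h2 : PySem.Set.union (PySem.Set.ofList L) [a] = L ++ [a] := by
      rw [h1]
      show PySem.Set.update L [a] = L ++ [a]
      simp [PySem.Set.update, PySem.Set.add, PySem.Set.contains, ha]
    rw [h2]
    exact (List.perm_orderedInsert _ a L).trans (List.perm_append_singleton a L).symm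
  · have hle : (List.orderedInsert (· ≤ ·) a L).Pairwise (· ≤ ·) :=
      List.Sorted.orderedInsert a L (h.imp le_of_lt)
    have hnd2 : (List.orderedInsert (· ≤ ·) a L).Nodup :=
      ((List.perm_orderedInsert _ a L).nodup_iff).mpr (List.nodup_cons.mpr ⟨ha, hnd⟩)
    exact (hle.and hnd2).imp (fun hp => lt_of_le_of_ne hp.1 hp.2)

theorem comp_pairwise (U : List Int) (f : Nat → Bool) (hUlt : U.Pairwise (· < ·)) :
    (((List.range U.length).filter f).map (fun k => U.getD k 0)).Pairwise (· < ·) := by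
  rw [List.pairwise_map]
  apply List.Pairwise.imp_of_mem ?_ (List.pairwise_lt_range.filter f)
  intro i j hi hj hij
  have hi' : i < U.length := List.mem_range.mp (List.mem_of_mem_filter hi)
  have hj' : j < U.length := List.mem_range.mp (List.mem_of_mem_filter hj)
  rw [List.getD_eq_getElem U 0 hi', List.getD_eq_getElem U 0 hj']
  exact List.pairwise_iff_getElem.mp hUlt i j hi' hj' hij

theorem comp_not_mem (U : List Int) (f : Nat → Bool) (x : Int) (hx : x ∉ U) :
    x ∉ ((List.range U.length).filter f).map (fun k => U.getD k 0) := by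
  intro hm
  obtain ⟨k, hk, hkx⟩ := List.mem_map.mp hm
  have hk' : k < U.length := List.mem_range.mp (List.mem_of_mem_filter hk)
  rw [List.getD_eq_getElem U 0 hk'] at hkx
  exact hx (hkx ▸ List.getElem_mem hk')

theorem ea_eq (T : List (Int × Int × Int)) (a : Int) (L : List Int)
    (hL : L.Pairwise (· < ·)) (ha : a ∉ L) :
    (if (PySem.List.sorted (PySem.Set.union (PySem.Set.ofList L) [a]) (fun x => x)).length = 1
      then (1 : Int)
      else (PySem.List.permutations
              (PySem.List.sorted (PySem.Set.union (PySem.Set.ofList L) [a]) (fun x => x))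
              (PySem.List.sorted (PySem.Set.union (PySem.Set.ofList L) [a]) (fun x => x)).length).foldl
        (fun acc p => if PySem.List.pyGet? p (-1) == some a then acc + prodChain T p else acc) 0)
    = pathEnd T L a := by
  have hSS := sortedset_eq L a hL ha
  rw [hSS]
  set SS := List.orderedInsert (· ≤ ·) a L with hSSdef
  have hperm : SS.Perm (a :: L) := List.perm_orderedInsert _ a L
  have hlen : SS.length = L.length + 1 := by rw [hperm.length_eq]; rfl
  have hnodupL : L.Nodup := hL.imp ne_of_lt
  have hnodup : SS.Nodup := hperm.nodup_iff.mpr (List.nodup_cons.mpr ⟨ha, hnodupL⟩)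
  have haSS : a ∈ SS := hperm.mem_iff.mpr List.mem_cons_self
  have herase : SS.erase a = L := oi_erase a L ha
  by_cases hLnil : L = []
  · subst hLnil
    rw [if_pos (by simp [hlen])]
    simp [pathEnd]
  · have hL0 : L.length ≠ 0 := fun hc => hLnil (List.eq_nil_of_length_eq_zero hc)
    rw [if_neg (by omega)]
    rw [PySem.List.foldl_if_eq_foldl_filter
        (p := fun p => PySem.List.pyGet? p (-1) == some a)
        (f := fun acc p => acc + prodChain T p),
        PySem.List.foldl_add, zero_add]
    have hpred : (fun p : List Int => PySem.List.pyGet? p (-1) == some a)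
        = (fun q : List Int => q.getLast? == some a) := by
      funext p; rw [PySem.List.pyGet?_neg_one]
    rw [hpred]
    have h2 : 2 ≤ SS.length := by omega
    rw [show (PySem.List.permutations SS SS.length).filter (fun q => q.getLast? == some a)
        = (PP SS).filter (fun q => q.getLast? == some a) from rfl]
    rw [ea_big T a SS hnodup haSS h2, herase]
    rw [pathEnd_eq T L.length a L le_rfl hnodupL, if_neg hLnil]

theorem bb_eq (T : List (Int × Int × Int)) (b : Int) (L : List Int)
    (hL : L.Pairwise (· < ·)) (hb : b ∉ L) :
    (if (PySem.List.sorted (PySem.Set.union (PySem.Set.ofList L) [b]) (fun x => x)).length = 1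
      then (1 : Int)
      else (PySem.List.permutations
              (PySem.List.sorted (PySem.Set.union (PySem.Set.ofList L) [b]) (fun x => x))
              (PySem.List.sorted (PySem.Set.union (PySem.Set.ofList L) [b]) (fun x => x)).length).foldl
        (fun acc p => if PySem.List.pyGet? p 0 == some b then acc + prodChain T p else acc) 0)
    = pathStart T b L := by
  have hSS := sortedset_eq L b hL hb
  rw [hSS]
  set SS := List.orderedInsert (· ≤ ·) b L with hSSdef
  have hperm : SS.Perm (b :: L) := List.perm_orderedInsert _ b L
  have hlen : SS.length = L.length + 1 := by rw [hperm.length_eq]; rfl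
  have hnodupL : L.Nodup := hL.imp ne_of_lt
  have hnodup : SS.Nodup := hperm.nodup_iff.mpr (List.nodup_cons.mpr ⟨hb, hnodupL⟩)
  have hbSS : b ∈ SS := hperm.mem_iff.mpr List.mem_cons_self
  have herase : SS.erase b = L := oi_erase b L hb
  by_cases hLnil : L = []
  · subst hLnil
    rw [if_pos (by simp [hlen])]
    simp [pathStart, DS_base]
  · have hL0 : L.length ≠ 0 := fun hc => hLnil (List.eq_nil_of_length_eq_zero hc)
    rw [if_neg (by omega)]
    rw [PySem.List.foldl_if_eq_foldl_filter
        (p := fun p => PySem.List.pyGet? p 0 == some b)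
        (f := fun acc p => acc + prodChain T p),
        PySem.List.foldl_add, zero_add]
    have hpred : (fun p : List Int => PySem.List.pyGet? p 0 == some b)
        = (fun q : List Int => q[0]? == some b) := by
      funext p; rw [PySem.List.pyGet?_zero]
    rw [hpred]
    rw [show (PySem.List.permutations SS SS.length).filter (fun q => q[0]? == some b)
        = (PP SS).filter (fun q => q[0]? == some b) from rfl]
    rw [bb_big T b SS hnodup hbSS, herase]
    rw [pathStart_eq T L.length L b le_rfl hnodupL]

-- ===== VERDICT (by name: the statement is the Claim_ definition above) =====
theorem compute_M_offdiag_spec : Claim_equal_compute_M_offdiag := by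
  intro T n a b _hdom
  unfold Spec_compute_M_offdiag compute_M_offdiag compute_M_offdiag_alt
  have hUlt : ((PySem.List.pyRange 0 n 1).filter (fun v => v != a && v != b)).Pairwise (· < ·) :=
    (PySem.List.pairwise_lt_pyRange_one 0 n).filter _
  have haU : a ∉ (PySem.List.pyRange 0 n 1).filter (fun v => v != a && v != b) := by
    intro hm
    have := (List.mem_filter.mp hm).2
    simp at this
  have hbU : b ∉ (PySem.List.pyRange 0 n 1).filter (fun v => v != a && v != b) := by
    intro hm
    have := (List.mem_filter.mp hm).2
    simp at this
  dsimp only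
  congr 1
  funext val mask
  dsimp only
  rw [ea_eq T a _ (comp_pairwise _ _ hUlt) (comp_not_mem _ _ a haU),
      bb_eq T b _ (comp_pairwise _ _ hUlt) (comp_not_mem _ _ b hbU)]
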